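-- pv_equiv track=rewrite | github.com/riteshkumar800/Krishidost | ai_v2/src/season_detection.py | detect_season_from_month
-- ===== SOURCE A (Python) =====
-- SEASON_DEFINITIONS = {
--     'north_india': {
--         'kharif': [6, 7, 8, 9, 10],      # June to October (Monsoon crops)
--         'rabi': [11, 12, 1, 2, 3],       # November to March (Winter crops)
--         'zaid': [4, 5]                   # April to May (Summer crops)
--     },
--     'south_india': {
--         'kharif': [6, 7, 8, 9, 10, 11], # June to November (Southwest monsoon)
--         'rabi': [12, 1, 2, 3, 4],       # December to April (Northeast monsoon)
--         'zaid': [5]                      # May (Summer crops)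
--     },
--     'west_india': {
--         'kharif': [6, 7, 8, 9, 10],     # June to October
--         'rabi': [11, 12, 1, 2, 3],      # November to March
--         'zaid': [4, 5]                   # April to May
--     },
--     'east_india': {
--         'kharif': [6, 7, 8, 9, 10, 11], # June to November
--         'rabi': [12, 1, 2, 3],          # December to March
--         'zaid': [4, 5]                   # April to May
--     },
--     'default': {
--         'kharif': [6, 7, 8, 9, 10],     # June to October (Default)
--         'rabi': [11, 12, 1, 2, 3],      # November to March
--         'zaid': [4, 5]                   # April to May
--     }
-- }
--
-- def detect_season_from_month(month: int, region: str = 'default') -> str: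
--     """
--     Detect agricultural season based on month and region
--
--     Args:
--         month: Month number (1-12)
--         region: Region identifier (north_india, south_india, etc.)
--
--     Returns:
--         Season name ('kharif', 'rabi', 'zaid')
--     """
--     if region not in SEASON_DEFINITIONS:
--         region = 'default'
--
--     seasons = SEASON_DEFINITIONS[region]
--
--     for season, months in seasons.items():
--         if month in months:
--             return season
--
--     # Fallback to default if month not found
--     return 'kharif'
-- ===== SOURCE B (Python) =====
-- def detect_season_from_month(month: int, region: str = 'default') -> str:
--     """Detect agricultural season by closed-form month-range comparisons (no tables)."""
--     if region == 'south_india':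
--         if month == 5:
--             return 'zaid'
--         return 'rabi' if month == 12 or 1 <= month <= 4 else 'kharif'
--     if region == 'east_india':
--         if 4 <= month <= 5:
--             return 'zaid'
--         return 'rabi' if month == 12 or 1 <= month <= 3 else 'kharif'
--     # north_india, west_india, default, and any unknown region share one pattern
--     if 4 <= month <= 5:
--         return 'zaid'
--     return 'rabi' if 11 <= month <= 12 or 1 <= month <= 3 else 'kharif'
-- ===== Notes on version B (the rewrite author's own statement) =====
-- stated objective: alternative
-- what changed: B drops the season tables entirely and decides the season by closed-form month-range comparisons, with three region patterns (south_india, east_india, everything else) and 'kharif' as the catch-all branch covering both monsoon months and A's out-of-range fallback.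
import Mathlib
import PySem

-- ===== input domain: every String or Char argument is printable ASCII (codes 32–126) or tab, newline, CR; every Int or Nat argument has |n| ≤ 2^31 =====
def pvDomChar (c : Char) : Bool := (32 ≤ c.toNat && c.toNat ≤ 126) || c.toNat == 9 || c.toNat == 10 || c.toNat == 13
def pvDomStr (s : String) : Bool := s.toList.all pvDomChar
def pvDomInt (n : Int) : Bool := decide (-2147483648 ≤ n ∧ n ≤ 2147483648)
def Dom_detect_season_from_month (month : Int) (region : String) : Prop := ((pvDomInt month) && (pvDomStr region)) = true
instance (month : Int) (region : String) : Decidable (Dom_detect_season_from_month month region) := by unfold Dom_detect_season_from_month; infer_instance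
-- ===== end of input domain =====

-- B replaces A's table scan by closed-form month-range comparisons (alternative algorithm; same exact values).

-- ===== PORT A =====
-- SEASON_DEFINITIONS, a dict of dicts (insertion order preserved)
def pySeasonDefs : PySem.Dict String (PySem.Dict String (List Int)) :=
  PySem.Dict.ofList [
    ("north_india", PySem.Dict.ofList [("kharif", [6,7,8,9,10]), ("rabi", [11,12,1,2,3]), ("zaid", [4,5])]),
    ("south_india", PySem.Dict.ofList [("kharif", [6,7,8,9,10,11]), ("rabi", [12,1,2,3,4]), ("zaid", [5])]),
    ("west_india",  PySem.Dict.ofList [("kharif", [6,7,8,9,10]), ("rabi", [11,12,1,2,3]), ("zaid", [4,5])]),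
    ("east_india",  PySem.Dict.ofList [("kharif", [6,7,8,9,10,11]), ("rabi", [12,1,2,3]), ("zaid", [4,5])]),
    ("default",     PySem.Dict.ofList [("kharif", [6,7,8,9,10]), ("rabi", [11,12,1,2,3]), ("zaid", [4,5])])
  ]

-- the 'for season, months in seasons.items(): if month in months: return season' loop, fallback 'kharif'
def seasonLoop (month : Int) : List (String × List Int) → String
  | [] => "kharif"
  | (season, months) :: rest => if month ∈ months then season else seasonLoop month rest

def detect_season_from_month (month : Int) (region : String) : String :=
  let region := if pySeasonDefs.contains region then region else "default"
  -- SEASON_DEFINITIONS[region]: indexing cannot fail here (region was just normalized into the keys)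
  let seasons := (pySeasonDefs.get? region).getD PySem.Dict.empty
  seasonLoop month seasons.items

-- ===== PORT B =====
def detect_season_from_month_alt (month : Int) (region : String) : String :=
  if region = "south_india" then
    if month = 5 then "zaid"
    else if month = 12 ∨ (1 ≤ month ∧ month ≤ 4) then "rabi" else "kharif"
  else if region = "east_india" then
    if 4 ≤ month ∧ month ≤ 5 then "zaid"
    else if month = 12 ∨ (1 ≤ month ∧ month ≤ 3) then "rabi" else "kharif"
  else
    -- north_india, west_india, default, and any unknown region share one pattern
    if 4 ≤ month ∧ month ≤ 5 then "zaid"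
    else if (11 ≤ month ∧ month ≤ 12) ∨ (1 ≤ month ∧ month ≤ 3) then "rabi" else "kharif"

-- ===== PRECONDITION & SPEC =====
def Spec_detect_season_from_month (month : Int) (region : String) (out : String) : Prop := out = detect_season_from_month_alt month region
instance (month : Int) (region : String) (out : String) : Decidable (Spec_detect_season_from_month month region out) := by unfold Spec_detect_season_from_month; infer_instance

-- ===== CLAIM (what is proved, stated in full; the proofs are below) =====
def Claim_equal_detect_season_from_month : Prop := ∀ (month : Int) (region : String), Dom_detect_season_from_month month region → Spec_detect_season_from_month month region (detect_season_from_month month region)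

-- ===== LEMMAS AND PROOFS =====

-- A's scan over the default/north/west month table equals B's default range pattern
lemma loop_default (m : Int) :
    seasonLoop m [("kharif", [6,7,8,9,10]), ("rabi", [11,12,1,2,3]), ("zaid", [4,5])] =
      (if 4 ≤ m ∧ m ≤ 5 then "zaid"
       else if (11 ≤ m ∧ m ≤ 12) ∨ (1 ≤ m ∧ m ≤ 3) then "rabi" else "kharif") := by
  simp only [seasonLoop, List.mem_cons, List.not_mem_nil, or_false]
  split_ifs <;> first | rfl | omega

-- A's scan over the south_india month table equals B's south range pattern
lemma loop_south (m : Int) :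
    seasonLoop m [("kharif", [6,7,8,9,10,11]), ("rabi", [12,1,2,3,4]), ("zaid", [5])] =
      (if m = 5 then "zaid"
       else if m = 12 ∨ (1 ≤ m ∧ m ≤ 4) then "rabi" else "kharif") := by
  simp only [seasonLoop, List.mem_cons, List.not_mem_nil, or_false]
  split_ifs <;> first | rfl | omega

-- A's scan over the east_india month table equals B's east range pattern
lemma loop_east (m : Int) :
    seasonLoop m [("kharif", [6,7,8,9,10,11]), ("rabi", [12,1,2,3]), ("zaid", [4,5])] =
      (if 4 ≤ m ∧ m ≤ 5 then "zaid"
       else if m = 12 ∨ (1 ≤ m ∧ m ≤ 3) then "rabi" else "kharif") := by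
  simp only [seasonLoop, List.mem_cons, List.not_mem_nil, or_false]
  split_ifs <;> first | rfl | omega

-- ===== VERDICT (by name: the statement is the Claim_ definition above) =====
theorem detect_season_from_month_spec : Claim_equal_detect_season_from_month := by
  intro month region _
  unfold Spec_detect_season_from_month detect_season_from_month detect_season_from_month_alt
  by_cases hc : pySeasonDefs.contains region
  · have hk : region ∈ pySeasonDefs.keys := by
      rw [PySem.Dict.contains_eq_decide_mem_keys] at hc; exact of_decide_eq_true hc
    rw [show pySeasonDefs.keys = ["north_india", "south_india", "west_india", "east_india", "default"]
      from by decide] at hk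
    have : region = "north_india" ∨ region = "south_india" ∨ region = "west_india" ∨
        region = "east_india" ∨ region = "default" := by simpa using hk
    rcases this with h | h | h | h | h <;> subst h <;> simp only [hc, if_true]
    · simpa using loop_default month
    · simpa using loop_south month
    · simpa using loop_default month
    · simpa using loop_east month
    · simpa using loop_default month
  · have hn : pySeasonDefs.get? region = none := by
      cases hg : pySeasonDefs.get? region with
      | none => rfl
      | some v => exact absurd (by rw [PySem.Dict.contains_eq_isSome_get?, hg]; rfl) hc
    have hs : region ≠ "south_india" := by rintro rfl; exact hc (by decide)
    have he : region ≠ "east_india" := by rintro rfl; exact hc (by decide)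
    rw [if_neg hc, if_neg hs, if_neg he]
    simpa using loop_default month
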